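-- pv_equiv track=rewrite | github.com/Fortunoxx/AdventOfCode2023 | src/day01.py | convert_text_to_numbers
-- ===== SOURCE A (Python) =====
-- def convert_text_to_numbers(line):
--     items = [
--         ("one", 1),
--         ("two", 2),
--         ("three", 3),
--         ("four", 4),
--         ("five", 5),
--         ("six", 6),
--         ("seven", 7),
--         ("eight", 8),
--         ("nine", 9),
--     ]
--
--     digits = []
--     for i in range(0, len(line)):
--         part = line[-(len(line)-i):]
--         for (key, value) in items:
--             if part.startswith(key):
--                 digits.append(value)
--                 break
--             elif part.startswith(str(value)):
--                 digits.append(value)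
--                 break
--
--     new = ""
--     for d in digits:
--         new += str(d)
--     return new
-- ===== SOURCE B (Python) =====
-- def convert_text_to_numbers(line):
--     words = [("one", 1), ("two", 2), ("three", 3), ("four", 4), ("five", 5),
--              ("six", 6), ("seven", 7), ("eight", 8), ("nine", 9)]
--     patterns = words + [(str(v), v) for _, v in words]
--     matches = []
--     for pat, val in patterns:
--         pos = line.find(pat)
--         while pos != -1:
--             matches.append((pos, val))
--             pos = line.find(pat, pos + 1)
--     matches.sort(key=lambda m: m[0])
--     return "".join(str(val) for _, val in matches)
-- ===== Notes on version B (the rewrite author's own statement) =====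
-- stated objective: faster
-- what changed: A scans every position, slicing off the whole remaining suffix and testing all nine word/digit pairs against it; B instead runs one str.find loop per pattern (advancing by 1 to catch overlaps) to collect (position, value) matches, sorts them by position, and joins the values.
import Mathlib
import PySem

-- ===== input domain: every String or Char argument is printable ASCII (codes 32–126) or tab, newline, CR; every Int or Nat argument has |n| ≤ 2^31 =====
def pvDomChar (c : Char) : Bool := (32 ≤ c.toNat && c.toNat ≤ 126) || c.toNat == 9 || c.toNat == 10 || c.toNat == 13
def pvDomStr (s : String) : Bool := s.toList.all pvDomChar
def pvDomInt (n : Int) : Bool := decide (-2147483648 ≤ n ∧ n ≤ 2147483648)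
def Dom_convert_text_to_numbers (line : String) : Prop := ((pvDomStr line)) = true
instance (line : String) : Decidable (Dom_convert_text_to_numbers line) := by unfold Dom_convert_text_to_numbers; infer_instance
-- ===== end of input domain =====

-- B rewrites A's per-position suffix scan as per-pattern find-loops collected into a
-- position-sorted match list; B avoids A's O(n) slice per position (objective: faster).

-- ===== PORT A =====
-- the `items` list of A (word, value)
def pvItemsA : List (String × Int) :=
  [("one", 1), ("two", 2), ("three", 3), ("four", 4), ("five", 5),
   ("six", 6), ("seven", 7), ("eight", 8), ("nine", 9)]

-- A's inner `for (key, value) in items: if part.startswith(key) … elif part.startswith(str(value)) …`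
-- loop with `break`: the first item whose word or digit form is a prefix of `part`.
def pvInnerA (part : List Char) : List (String × Int) → Option Int
  | [] => none
  | (key, value) :: rest =>
    if PySem.Chars.startswith part key.toList then some value
    else if PySem.Chars.startswith part (PySem.Int.toChars value) then some value
    else pvInnerA part rest

def convert_text_to_numbers (line : String) : String :=
  let cs := line.toList
  let digits : List Int :=
    (PySem.List.pyRange 0 (cs.length : Int) 1).foldl
      (fun digits i =>
        -- part = line[-(len(line)-i):]
        let part := PySem.List.slice cs (some (-((cs.length : Int) - i))) none
        match pvInnerA part pvItemsA with
        | some v => digits ++ [v]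
        | none   => digits) []
  -- new = ""; for d in digits: new += str(d)
  String.ofList (digits.foldl (fun new d => new ++ PySem.Int.toChars d) [])

-- ===== PORT B =====
def pvWordsB : List (String × Int) :=
  [("one", 1), ("two", 2), ("three", 3), ("four", 4), ("five", 5),
   ("six", 6), ("seven", 7), ("eight", 8), ("nine", 9)]

-- patterns = words + [(str(v), v) for _, v in words]
def pvPatternsB : List (String × Int) :=
  pvWordsB ++ pvWordsB.map (fun wv => (PySem.Int.toStr wv.2, wv.2))

-- `pos = line.find(pat); while pos != -1: matches.append((pos, val)); pos = line.find(pat, pos+1)`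
-- (fuel only makes the loop structurally total; it never changes the computed value)
def pvFindLoopB (cs pat : List Char) (val : Int) : Nat → Int → List (Int × Int)
  | 0, _ => []
  | fuel + 1, pos =>
    if pos = -1 then []
    else (pos, val) :: pvFindLoopB cs pat val fuel (PySem.Chars.findFrom cs pat (pos + 1) none)

def convert_text_to_numbers_alt (line : String) : String :=
  let cs := line.toList
  let ms : List (Int × Int) :=
    pvPatternsB.foldl
      (fun acc pv =>
        acc ++ pvFindLoopB cs pv.1.toList pv.2 (cs.length + 1) (PySem.Chars.find cs pv.1.toList)) []
  -- matches.sort(key=lambda m: m[0]); "".join(str(val) for _, val in matches)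
  let sortedM := PySem.List.sorted ms (fun m => m.1) false
  String.ofList (PySem.Chars.join [] (sortedM.map (fun m => PySem.Int.toChars m.2)))

-- ===== PRECONDITION & SPEC =====
def Spec_convert_text_to_numbers (line : String) (out : String) : Prop := out = convert_text_to_numbers_alt line
instance (line : String) (out : String) : Decidable (Spec_convert_text_to_numbers line out) := by unfold Spec_convert_text_to_numbers; infer_instance

-- ===== CLAIM (what is proved, stated in full; the proofs are below) =====
def Claim_equal_convert_text_to_numbers : Prop := ∀ (line : String), Dom_convert_text_to_numbers line → Spec_convert_text_to_numbers line (convert_text_to_numbers line)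

-- ===== LEMMAS AND PROOFS =====

def pvPatsA : List (List Char × Int) :=
  [("one".toList, 1), (PySem.Int.toChars 1, 1), ("two".toList, 2), (PySem.Int.toChars 2, 2),
   ("three".toList, 3), (PySem.Int.toChars 3, 3), ("four".toList, 4), (PySem.Int.toChars 4, 4),
   ("five".toList, 5), (PySem.Int.toChars 5, 5), ("six".toList, 6), (PySem.Int.toChars 6, 6),
   ("seven".toList, 7), (PySem.Int.toChars 7, 7), ("eight".toList, 8), (PySem.Int.toChars 8, 8),
   ("nine".toList, 9), (PySem.Int.toChars 9, 9)]

def pvInterleave : List (String × Int) → List (List Char × Int)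
  | [] => []
  | (k, v) :: rest => (k.toList, v) :: (PySem.Int.toChars v, v) :: pvInterleave rest

theorem pvInnerA_eq_find?_gen (part : List Char) (items : List (String × Int)) :
    pvInnerA part items = ((pvInterleave items).find? (fun pv => pv.1.isPrefixOf part)).map (·.2) := by
  induction items with
  | nil => rfl
  | cons kv rest ih =>
    obtain ⟨k, v⟩ := kv
    simp only [pvInnerA, pvInterleave, List.find?, PySem.Chars.startswith]
    rcases Bool.eq_false_or_eq_true (k.toList.isPrefixOf part) with h1 | h1 <;>
      rcases Bool.eq_false_or_eq_true ((PySem.Int.toChars v).isPrefixOf part) with h2 | h2 <;>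
      simp [h1, h2, ih]

theorem pvPatsA_eq : pvPatsA = pvInterleave pvItemsA := by decide

theorem pvInnerA_eq_find? (part : List Char) :
    pvInnerA part pvItemsA = (pvPatsA.find? (fun pv => pv.1.isPrefixOf part)).map (·.2) := by
  rw [pvPatsA_eq, pvInnerA_eq_find?_gen]

theorem pvUniqPre : ∀ x ∈ pvPatsA, ∀ y ∈ pvPatsA, x.1 <+: y.1 → x = y := by decide

theorem pvUniq (part : List Char) :
    ∀ x ∈ pvPatsA, ∀ y ∈ pvPatsA, x.1 <+: part → y.1 <+: part → x = y := by
  intro x hx y hy hxp hyp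
  rcases List.prefix_or_prefix_of_prefix hxp hyp with h | h
  · exact pvUniqPre x hx y hy h
  · exact (pvUniqPre y hy x hx h).symm

def pvMatchAt (cs : List Char) (i : Nat) : Option Int := pvInnerA (cs.drop i) pvItemsA

theorem pvMatchAt_eq_some_iff (cs : List Char) (i : Nat) (v : Int) :
    pvMatchAt cs i = some v ↔ ∃ p, (p, v) ∈ pvPatsA ∧ p <+: cs.drop i := by
  unfold pvMatchAt
  rw [pvInnerA_eq_find?]
  constructor
  · intro h
    rcases Option.map_eq_some_iff.mp h with ⟨pv, hfind, hv⟩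
    refine ⟨pv.1, ?_, ?_⟩
    · rw [show ((pv.1, v) : List Char × Int) = pv by rw [← hv]]
      exact List.mem_of_find?_eq_some hfind
    · exact List.isPrefixOf_iff_prefix.mp (by simpa using List.find?_some hfind)
  · rintro ⟨p, hm, hp⟩
    cases hfind : pvPatsA.find? (fun pv => pv.1.isPrefixOf (cs.drop i)) with
    | none =>
      exact absurd (List.isPrefixOf_iff_prefix.mpr hp)
        (by simpa using List.find?_eq_none.mp hfind (p, v) hm)
    | some pv =>
      have hpv : pv = (p, v) :=
        pvUniq (cs.drop i) pv (List.mem_of_find?_eq_some hfind) (p, v) hm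
          (List.isPrefixOf_iff_prefix.mp (by simpa using List.find?_some hfind)) hp
      simp [hpv]

def pvOcc (cs pat : List Char) (s : Nat) : List Nat :=
  (List.range' s (cs.length - s)).filter (fun i => pat.isPrefixOf (cs.drop i))

theorem pvInfix_of_prefix_drop (cs pat : List Char) (s i : Nat) (hsi : s ≤ i)
    (hp : pat <+: cs.drop i) : pat <:+: cs.drop s := by
  have : cs.drop i = (cs.drop s).drop (i - s) := by
    rw [List.drop_drop]; congr 1; omega
  exact (hp.isInfix).trans (by rw [this]; exact (List.drop_suffix _ _).isInfix)

theorem pvOcc_eq_nil (cs pat : List Char) (s : Nat) (_hs : s ≤ cs.length)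
    (h : ¬ pat <:+: cs.drop s) : pvOcc cs pat s = [] := by
  refine List.filter_eq_nil_iff.mpr ?_
  intro i hi
  obtain ⟨k, hk, rfl⟩ := List.mem_range'.mp hi
  intro hpre
  exact h (pvInfix_of_prefix_drop cs pat s (s + 1 * k) (by omega)
    (List.isPrefixOf_iff_prefix.mp hpre))

theorem pvOcc_cons (cs pat : List Char) (s t : Nat) (ht : t < cs.length) (hst : s ≤ t)
    (hpre : pat <+: cs.drop t) (hmin : ∀ i, s ≤ i → i < t → ¬ pat <+: cs.drop i) :
    pvOcc cs pat s = t :: pvOcc cs pat (t + 1) := by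
  unfold pvOcc
  rw [show cs.length - s = (t - s) + ((cs.length - t - 1) + 1) by omega,
    ← List.range'_append, show s + 1 * (t - s) = t by omega, List.filter_append]
  have h1 : (List.range' s (t - s)).filter (fun i => pat.isPrefixOf (cs.drop i)) = [] := by
    refine List.filter_eq_nil_iff.mpr ?_
    intro i hi
    obtain ⟨k, hk, rfl⟩ := List.mem_range'.mp hi
    intro hp
    exact hmin _ (by omega) (by omega) (List.isPrefixOf_iff_prefix.mp hp)
  rw [h1, List.range'_succ, List.filter_cons]
  simp only [List.isPrefixOf_iff_prefix.mpr hpre, if_true, List.nil_append]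
  rw [show cs.length - t - 1 = cs.length - (t + 1) by omega]

theorem pvFindLoop_spec (cs pat : List Char) (val : Int) (hpat : pat ≠ []) :
    ∀ fuel s, s ≤ cs.length → cs.length + 1 - s ≤ fuel →
      pvFindLoopB cs pat val fuel (PySem.Chars.findFrom cs pat (s : Int) none) =
        (pvOcc cs pat s).map (fun i : Nat => ((i : Int), val)) := by
  intro fuel
  induction fuel with
  | zero => intro s hs hf; omega
  | succ m ih =>
    intro s hs hf
    by_cases hne : PySem.Chars.findFrom cs pat (s : Int) none = -1
    · rw [pvFindLoopB, if_pos hne,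
        pvOcc_eq_nil cs pat s hs ((PySem.Chars.findFrom_natCast_eq_neg_one_iff cs pat s hs).mp hne)]
      rfl
    · obtain ⟨hge, hpre, hmin⟩ := PySem.Chars.findFrom_natCast_spec cs pat s hs hne
      have hr0 : (0 : Int) ≤ PySem.Chars.findFrom cs pat (s : Int) none :=
        le_trans (by exact_mod_cast Int.natCast_nonneg s) hge
      set r := PySem.Chars.findFrom cs pat (s : Int) none with hrdef
      set t := r.toNat with htdef
      have hrt : r = (t : Int) := (Int.toNat_of_nonneg hr0).symm
      have hst : s ≤ t := by omega
      have htlen : t < cs.length := by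
        have h1 := hpre.length_le
        rw [List.length_drop] at h1
        have h2 : 0 < pat.length := List.length_pos_iff.mpr hpat
        omega
      rw [pvFindLoopB, if_neg hne,
        pvOcc_cons cs pat s t htlen hst hpre (fun i his hit => hmin i his hit),
        List.map_cons]
      congr 1
      · rw [hrt]
      · rw [show r + 1 = ((t + 1 : Nat) : Int) by omega]
        exact ih (t + 1) (by omega) (by omega)

def pvCharPats : List (List Char × Int) := pvPatternsB.map (fun pv => (pv.1.toList, pv.2))

theorem pvPatternsB_nonempty : ∀ pv ∈ pvPatternsB, pv.1.toList ≠ [] := by decide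

theorem pvMatches_eq (cs : List Char) :
    pvPatternsB.foldl
      (fun acc pv =>
        acc ++ pvFindLoopB cs pv.1.toList pv.2 (cs.length + 1) (PySem.Chars.find cs pv.1.toList)) []
      = pvCharPats.flatMap (fun pv => (pvOcc cs pv.1 0).map (fun i : Nat => ((i : Int), pv.2))) := by
  rw [PySem.List.foldl_append_eq_flatMap, List.nil_append, pvCharPats, List.flatMap_map]
  refine List.flatMap_congr ?_
  intro pv hpv
  rw [← PySem.Chars.findFrom_zero, show (0 : Int) = ((0 : Nat) : Int) by norm_num,
    pvFindLoop_spec cs pv.1.toList pv.2 (pvPatternsB_nonempty pv hpv) (cs.length + 1) 0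
      (by omega) (by omega)]

def pvCanon (cs : List Char) : List (Int × Int) :=
  (List.range cs.length).filterMap (fun i => (pvMatchAt cs i).map (fun v => ((i : Int), v)))

theorem pvPatsA_perm : pvPatsA.Perm pvCharPats := by decide

theorem pvCharPats_nodup : pvCharPats.Nodup := by decide

theorem pvCanon_pairwise (cs : List Char) :
    (pvCanon cs).Pairwise (fun a b => a.1 < b.1) := by
  unfold pvCanon
  refine List.Pairwise.filterMap _ ?_ List.pairwise_lt_range
  intro i j hij b hb b' hb'
  obtain ⟨v, -, rfl⟩ := Option.map_eq_some_iff.mp hb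
  obtain ⟨v', -, rfl⟩ := Option.map_eq_some_iff.mp hb'
  show (i : Int) < (j : Int)
  exact_mod_cast hij

theorem pvCanon_nodup (cs : List Char) : (pvCanon cs).Nodup :=
  (pvCanon_pairwise cs).imp (fun h => by intro he; rw [he] at h; exact lt_irrefl _ h)

def pvFlat (cs : List Char) : List (Int × Int) :=
  pvCharPats.flatMap (fun pv => (pvOcc cs pv.1 0).map (fun i : Nat => ((i : Int), pv.2)))

theorem pvMem_occ (cs pat : List Char) (i : Nat) :
    i ∈ pvOcc cs pat 0 ↔ i < cs.length ∧ pat <+: cs.drop i := by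
  unfold pvOcc
  rw [Nat.sub_zero, List.range_eq_range'.symm, List.mem_filter, List.mem_range,
    List.isPrefixOf_iff_prefix]

theorem pvMem_flat_iff_mem_canon (cs : List Char) (x : Int × Int) :
    x ∈ pvFlat cs ↔ x ∈ pvCanon cs := by
  unfold pvFlat pvCanon
  rw [List.mem_flatMap, List.mem_filterMap]
  constructor
  · rintro ⟨pv, hpv, hx⟩
    obtain ⟨i, hi, rfl⟩ := List.mem_map.mp hx
    obtain ⟨hilen, hpre⟩ := (pvMem_occ cs pv.1 i).mp hi
    refine ⟨i, List.mem_range.mpr hilen, ?_⟩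
    rw [(pvMatchAt_eq_some_iff cs i pv.2).mpr ⟨pv.1, pvPatsA_perm.mem_iff.mpr hpv, hpre⟩]
    rfl
  · rintro ⟨i, hi, hx⟩
    obtain ⟨v, hv, rfl⟩ := Option.map_eq_some_iff.mp hx
    obtain ⟨p, hm, hpre⟩ := (pvMatchAt_eq_some_iff cs i v).mp hv
    refine ⟨(p, v), pvPatsA_perm.mem_iff.mp hm, List.mem_map.mpr
      ⟨i, (pvMem_occ cs p i).mpr ⟨List.mem_range.mp hi, hpre⟩, rfl⟩⟩

theorem pvFlat_nodup (cs : List Char) : (pvFlat cs).Nodup := by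
  unfold pvFlat
  rw [List.nodup_flatMap]
  constructor
  · intro pv _
    refine List.Nodup.map ?_ (List.Nodup.filter _ (List.nodup_range' 1))
    intro a b hab
    simpa using hab
  · refine pvCharPats_nodup.imp_of_mem ?_
    intro pv qv hpv hqv hne x hx hx'
    obtain ⟨i, hi, rfl⟩ := List.mem_map.mp hx
    obtain ⟨j, hj, hij⟩ := List.mem_map.mp hx'
    have hji : j = i := by
      have h0 : (j : Int) = (i : Int) := congrArg Prod.fst hij
      exact_mod_cast h0
    subst hji
    have hpvq : (pv.1, pv.2) = (qv.1, qv.2) :=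
      pvUniq (cs.drop j) (pv.1, pv.2) (pvPatsA_perm.mem_iff.mpr (by simpa using hpv))
        (qv.1, qv.2) (pvPatsA_perm.mem_iff.mpr (by simpa using hqv))
        ((pvMem_occ cs pv.1 j).mp hi).2 ((pvMem_occ cs qv.1 j).mp hj).2
    exact hne (by cases pv; cases qv; simpa using hpvq)

theorem pvSorted_eq_canon (cs : List Char) :
    PySem.List.sorted (pvFlat cs) (fun m => m.1) false = pvCanon cs := by
  refine PySem.List.sorted_eq_of_perm_of_pairwise_lt _ _ _ ?_ (pvCanon_pairwise cs)
  exact (List.perm_ext_iff_of_nodup (pvCanon_nodup cs) (pvFlat_nodup cs)).mpr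
    (fun a => (pvMem_flat_iff_mem_canon cs a).symm)

theorem pvJoin_nil (l : List (List Char)) : PySem.Chars.join [] l = l.flatten := by
  induction l with
  | nil => rfl
  | cons a t ih =>
    cases t with
    | nil => simp [PySem.Chars.join, List.intercalate]
    | cons b t2 =>
      simp only [PySem.Chars.join, List.intercalate] at ih ⊢
      simp [List.intersperse, ih]

theorem pvFoldl_filterMap (f : Nat → Option Int) (l : List Nat) (acc : List Int) :
    l.foldl (fun a i => match f i with | some v => a ++ [v] | none => a) acc
      = acc ++ l.filterMap f := by
  induction l generalizing acc with
  | nil => simp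
  | cons x t ih => cases hf : f x <;> simp [hf, ih]

theorem pvA_eq (line : String) :
    convert_text_to_numbers line =
      String.ofList (((List.range line.toList.length).filterMap (pvMatchAt line.toList)).flatMap
        PySem.Int.toChars) := by
  unfold convert_text_to_numbers
  set cs := line.toList with hcs
  simp only [PySem.List.foldl_append_eq_flatMap, List.nil_append]
  congr 1
  rw [PySem.List.pyRange_one]
  simp only [Int.sub_zero, Int.toNat_natCast, List.foldl_map]
  rw [PySem.List.foldl_congr_mem _ _
    (fun (digits : List Int) (k : Nat) =>
      match pvMatchAt cs k with
      | some v => digits ++ [v]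
      | none => digits) [] ?_]
  · rw [pvFoldl_filterMap, List.nil_append]
  · intro acc k hk
    have hklen : k < cs.length := List.mem_range.mp hk
    have hslice : PySem.List.slice cs (some (-((cs.length : Int) - (0 + (k : Int))))) none
        = cs.drop k := by
      rw [zero_add, ← Nat.cast_sub hklen.le,
        PySem.List.slice_from_neg_natCast cs (cs.length - k) (by omega),
        show cs.length - (cs.length - k) = k by omega]
    rw [hslice]
    rfl

theorem pvB_eq (line : String) :
    convert_text_to_numbers_alt line =
      String.ofList (((List.range line.toList.length).filterMap (pvMatchAt line.toList)).flatMap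
        PySem.Int.toChars) := by
  unfold convert_text_to_numbers_alt
  dsimp only
  set cs := line.toList with hcs
  rw [pvMatches_eq cs]
  have : pvCharPats.flatMap (fun pv => (pvOcc cs pv.1 0).map (fun i : Nat => ((i : Int), pv.2)))
      = pvFlat cs := rfl
  rw [this, pvSorted_eq_canon cs, pvJoin_nil]
  congr 1
  rw [List.flatMap_def]
  congr 1
  unfold pvCanon
  rw [List.map_filterMap, List.map_filterMap]
  simp [Option.map_map, Function.comp_def]

-- ===== VERDICT (by name: the statement is the Claim_ definition above) =====
theorem convert_text_to_numbers_spec : Claim_equal_convert_text_to_numbers := by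
  intro line _
  unfold Spec_convert_text_to_numbers
  rw [pvA_eq, pvB_eq]
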